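-- pv_equiv track=rewrite | github.com/Abdosamiir/AI-project | ai task/algorithms/Solver.py | ucs_solver
-- ===== SOURCE A (Python) =====
-- import heapq
--
-- def is_valid_solution(partial_solution_list):
--     last_row_index = len(partial_solution_list) - 1
--     last_col_index = partial_solution_list[last_row_index]
--
--     for row_index, col_index in enumerate(partial_solution_list[:last_row_index]):
--         if col_index == last_col_index or abs(row_index - last_row_index) == abs(col_index - last_col_index):
--             return False
--
--     return True
--
-- def ucs_solver(partial_solution, dimensions):
--     priority_queue = [(0, partial_solution)]  # Priority queue of (cost, partial_solution)
--     while priority_queue: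
--         cost, current_partial_solution = heapq.heappop(priority_queue)
--         if len(current_partial_solution) == dimensions:  # Goal state reached
--             return current_partial_solution
--         for next_column in range(dimensions):  # Explore all possible next columns
--             if next_column not in current_partial_solution and is_valid_solution(current_partial_solution + [next_column]):
--                 # If placing a queen in the next column is valid
--                 next_partial_solution = current_partial_solution + [next_column]  # Generate the next partial solution
--                 next_cost = cost + 1  # Uniform cost for each action
--                 heapq.heappush(priority_queue, (next_cost, next_partial_solution))  # Enqueue with updated cost
--     return None  # If no solution is found
-- ===== SOURCE B (Python) =====
-- def ucs_solver(partial_solution, dimensions):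
--     # Depth-first backtracking trying columns in increasing order; returns the
--     # same (lexicographically first) completion as the uniform-cost search does.
--     def safe(sol, col):
--         new_row = len(sol)
--         for row, c in enumerate(sol):
--             if c == col or abs(row - new_row) == abs(c - col):
--                 return False
--         return True
--
--     def try_cols(sol, pending):
--         for c in pending:
--             if safe(sol, c):
--                 sol2 = sol + [c]
--                 if len(sol2) == dimensions:
--                     return sol2
--                 if len(sol2) < dimensions:
--                     r = try_cols(sol2, range(dimensions))
--                     if r is not None:
--                         return r
--         return None
--
--     if len(partial_solution) == dimensions:
--         return partial_solution
--     if len(partial_solution) > dimensions: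
--         return None
--     return try_cols(partial_solution, range(dimensions))
-- ===== Notes on version B (the rewrite author's own statement) =====
-- stated objective: alternative
-- what changed: A's uniform-cost search, which keeps a heap of all generated partial placements and pops them in (cost, lexicographic) order, is replaced by plain depth-first backtracking that tries columns in increasing order and returns the first completion found; both yield the lexicographically first valid completion.
import Mathlib
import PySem

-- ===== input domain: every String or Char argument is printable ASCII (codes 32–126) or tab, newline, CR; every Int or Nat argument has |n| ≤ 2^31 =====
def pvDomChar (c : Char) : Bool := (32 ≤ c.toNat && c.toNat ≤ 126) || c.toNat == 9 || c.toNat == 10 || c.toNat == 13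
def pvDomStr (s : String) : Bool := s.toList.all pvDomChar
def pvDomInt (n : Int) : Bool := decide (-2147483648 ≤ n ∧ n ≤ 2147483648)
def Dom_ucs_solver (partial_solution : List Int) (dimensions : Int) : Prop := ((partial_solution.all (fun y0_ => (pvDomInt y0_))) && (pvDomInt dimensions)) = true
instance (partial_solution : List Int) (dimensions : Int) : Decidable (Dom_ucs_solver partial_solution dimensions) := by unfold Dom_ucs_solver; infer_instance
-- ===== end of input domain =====

-- B replaces A's uniform-cost search with a heap of all partial placements by
-- depth-first backtracking in increasing column order (objective: alternative).


-- ===== PORT A =====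
-- is_valid_solution; on [] Python raises IndexError (pyGet? = none), which
-- ucs_solver never reaches (always called on current + [col]); false there.
def pvValid (l : List Int) : Bool :=
  match PySem.List.pyGet? l ((l.length : Int) - 1) with
  | none => false
  | some lastCol =>
      (PySem.List.enumerate (PySem.List.slice l none (some ((l.length : Int) - 1))) 0).all
        (fun p => !(p.2 == lastCol || ((p.1 - ((l.length : Int) - 1)).natAbs == (p.2 - lastCol).natAbs)))

-- Python's `<` on list[int] (lexicographic), used by heapq to order equal-cost entries.
def listLt : List Int → List Int → Bool
  | _, [] => false
  | [], _ :: _ => true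
  | a :: as, b :: bs => a < b || (a == b && listLt as bs)

-- Python's `<` on the (cost, partial_solution) tuples in the heap.
def pairLt (x y : Int × List Int) : Bool := x.1 < y.1 || (x.1 == y.1 && listLt x.2 y.2)

-- heapq.heappop returns the smallest tuple in the queue.
def popMin (x : Int × List Int) (xs : List (Int × List Int)) : Int × List Int :=
  xs.foldl (fun m y => if pairLt y m then y else m) x

-- the `for next_column in range(dimensions)` body: the entries pushed while expanding one node
def childrenA (dimensions : Int) (node : Int × List Int) : List (Int × List Int) :=
  (PySem.List.pyRange 0 dimensions 1).filterMap (fun col =>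
    if !node.2.contains col && pvValid (node.2 ++ [col]) then
      some (node.1 + 1, node.2 ++ [col]) else none)

-- termination measure for the UCS loop (proof-only; never computed at run time)
def pvFree (dimensions : Int) (s : List Int) : Nat :=
  ((PySem.List.pyRange 0 dimensions 1).filter (fun c => !s.contains c)).length
def pvW (dimensions : Int) : Nat := (PySem.List.pyRange 0 dimensions 1).length + 1
def pvMeasure (dimensions : Int) (q : List (Int × List Int)) : Nat :=
  (q.map (fun p => pvW dimensions ^ pvFree dimensions p.2)).sum

lemma foldl_min_mem (xs : List (Int × List Int)) : ∀ acc,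
    xs.foldl (fun m y => if pairLt y m then y else m) acc ∈ acc :: xs := by
  induction xs with
  | nil => intro acc; simp
  | cons z zs ih =>
    intro acc
    simp only [List.foldl_cons]
    rcases List.mem_cons.mp (ih (if pairLt z acc then z else acc)) with h | h
    · rw [h]; split <;> simp
    · simp [h]

lemma popMin_mem (x : Int × List Int) (xs : List (Int × List Int)) : popMin x xs ∈ x :: xs := by
  have := foldl_min_mem xs x
  unfold popMin
  rcases List.mem_cons.mp this with h | h <;> simp [h]

lemma pvMeasure_perm {dimensions : Int} {q q' : List (Int × List Int)} (h : q.Perm q') :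
    pvMeasure dimensions q = pvMeasure dimensions q' := by
  exact List.Perm.sum_eq (h.map _)

lemma pvMeasure_append (dimensions : Int) (q q' : List (Int × List Int)) :
    pvMeasure dimensions (q ++ q') = pvMeasure dimensions q + pvMeasure dimensions q' := by
  simp [pvMeasure]

lemma filterMap_if {α β : Type} (p : α → Bool) (f : α → β) (l : List α) :
    l.filterMap (fun c => if p c then some (f c) else none) = (l.filter p).map f := by
  induction l with
  | nil => rfl
  | cons a l ih =>
    simp only [List.filterMap_cons, List.filter_cons]
    by_cases hp : p a = true
    · rw [if_pos hp, if_pos hp]; simp [ih]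
    · rw [if_neg hp, if_neg hp]; exact ih

lemma sum_map_const {α : Type} (l : List α) (g : α → Nat) (v : Nat)
    (h : ∀ x ∈ l, g x = v) : (l.map g).sum = l.length * v := by
  induction l with
  | nil => simp
  | cons a l ih =>
    simp only [List.map_cons, List.sum_cons, List.length_cons]
    rw [h a (by simp), ih (fun x hx => h x (by simp [hx]))]
    ring

lemma filter_len_mono {α : Type} (p q : α → Bool) (l : List α)
    (h : ∀ a ∈ l, p a = true → q a = true) : (l.filter p).length ≤ (l.filter q).length := by
  induction l with
  | nil => simp
  | cons a l ih =>
    have ih' := ih (fun a ha => h a (by simp [ha]))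
    by_cases hp : p a = true
    · have hq := h a (by simp) hp
      simp [List.filter_cons, hp, hq]; omega
    · simp only [List.filter_cons]
      rw [if_neg hp]
      split <;> simp <;> omega

lemma free_child (dimensions : Int) (s : List Int) (col : Int)
    (hR : col ∈ PySem.List.pyRange 0 dimensions 1) (hc : s.contains col = false) :
    pvFree dimensions (s ++ [col]) + 1 = pvFree dimensions s := by
  unfold pvFree
  have hnods : ((PySem.List.pyRange 0 dimensions 1).filter (fun c => !s.contains c)).Nodup :=
    (PySem.List.nodup_pyRange_one 0 dimensions).filter _
  have hcs : col ∉ s := by simpa using hc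
  have hmemF : col ∈ (PySem.List.pyRange 0 dimensions 1).filter (fun c => !s.contains c) := by
    simp [List.mem_filter, hR, hcs]
  have hsplit : (PySem.List.pyRange 0 dimensions 1).filter (fun c => !(s ++ [col]).contains c)
      = ((PySem.List.pyRange 0 dimensions 1).filter (fun c => !s.contains c)).filter
          (fun c => !(c == col)) := by
    rw [List.filter_filter]
    apply List.filter_congr
    intro c _
    by_cases h1 : c ∈ s <;> by_cases h2 : c = col <;> simp [List.contains_append, h1, h2]
  have herase : ((PySem.List.pyRange 0 dimensions 1).filter (fun c => !s.contains c)).filter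
      (fun c => !(c == col))
      = ((PySem.List.pyRange 0 dimensions 1).filter (fun c => !s.contains c)).erase col := by
    rw [hnods.erase_eq_filter]
    apply List.filter_congr
    intro c _
    simp [bne]
  rw [hsplit, herase, List.length_erase_of_mem hmemF]
  have := List.length_pos_of_mem hmemF
  omega

lemma pv_arith (L F W : Nat) (h1 : L ≤ F) (h2 : F ≤ W - 1) (hW : 1 ≤ W) :
    L * W ^ (F - 1) < W ^ F := by
  cases F with
  | zero =>
    have hL : L = 0 := by omega
    simp [hL]
  | succ n =>
    have hWn : 0 < W ^ n := Nat.pow_pos (by omega)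
    have hLW : L < W := by omega
    simp only [Nat.succ_sub_one]
    calc L * W ^ n < W * W ^ n := mul_lt_mul_of_pos_right hLW hWn
      _ = W ^ (n + 1) := (pow_succ' W n).symm

lemma children_measure_lt (dimensions : Int) (node : Int × List Int) :
    pvMeasure dimensions (childrenA dimensions node) < pvW dimensions ^ pvFree dimensions node.2 := by
  unfold childrenA pvMeasure
  rw [filterMap_if]
  rw [List.map_map]
  have hval : ∀ col ∈ (PySem.List.pyRange 0 dimensions 1).filter
      (fun col => !node.2.contains col && pvValid (node.2 ++ [col])),
      ((fun p : Int × List Int => pvW dimensions ^ pvFree dimensions p.2) ∘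
        (fun col => (node.1 + 1, node.2 ++ [col]))) col
        = pvW dimensions ^ (pvFree dimensions node.2 - 1) := by
    intro col hcol
    have hmem := (List.mem_filter.mp hcol).1
    have hcond := (List.mem_filter.mp hcol).2
    have hnc : node.2.contains col = false := by
      simp only [Bool.and_eq_true] at hcond
      simpa using hcond.1
    have := free_child dimensions node.2 col hmem hnc
    simp only [Function.comp]
    congr 1
    omega
  rw [sum_map_const _ _ _ hval]
  have hlen1 : ((PySem.List.pyRange 0 dimensions 1).filter
      (fun col => !node.2.contains col && pvValid (node.2 ++ [col]))).length
      ≤ pvFree dimensions node.2 := by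
    unfold pvFree
    apply filter_len_mono
    intro a _ ha
    simp only [Bool.and_eq_true] at ha
    exact ha.1
  have hlen2 : pvFree dimensions node.2 ≤ pvW dimensions - 1 := by
    unfold pvFree pvW
    have := List.length_filter_le (fun c => !node.2.contains c) (PySem.List.pyRange 0 dimensions 1)
    omega
  have hW : 1 ≤ pvW dimensions := by unfold pvW; omega
  exact pv_arith _ _ _ hlen1 hlen2 hW

lemma measure_step (dimensions : Int) (x : Int × List Int) (xs : List (Int × List Int)) :
    pvMeasure dimensions (((x :: xs).erase (popMin x xs)) ++ childrenA dimensions (popMin x xs)) <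
      pvMeasure dimensions (x :: xs) := by
  have hperm := List.perm_cons_erase (popMin_mem x xs)
  have h1 : pvMeasure dimensions (x :: xs)
      = pvW dimensions ^ pvFree dimensions (popMin x xs).2
        + pvMeasure dimensions ((x :: xs).erase (popMin x xs)) := by
    rw [pvMeasure_perm hperm]; simp [pvMeasure]
  rw [pvMeasure_append, h1]
  have := children_measure_lt dimensions (popMin x xs)
  omega

-- the `while priority_queue:` loop of ucs_solver
def loopA (dimensions : Int) (q : List (Int × List Int)) : Option (List Int) :=
  match q with
  | [] => none
  | x :: xs =>
    if (((popMin x xs).2.length : Int)) = dimensions then some (popMin x xs).2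
    else loopA dimensions (((x :: xs).erase (popMin x xs)) ++ childrenA dimensions (popMin x xs))
termination_by pvMeasure dimensions q
decreasing_by exact measure_step dimensions x xs

def ucs_solver (partial_solution : List Int) (dimensions : Int) : Option (List Int) :=
  loopA dimensions [(0, partial_solution)]

-- ===== PORT B =====
def pvSafe (sol : List Int) (col : Int) : Bool :=
  (PySem.List.enumerate sol 0).all
    (fun p => !(p.2 == col || ((p.1 - (sol.length : Int)).natAbs == (p.2 - col).natAbs)))

def pvTry (dimensions : Int) (sol : List Int) (pending : List Int) : Option (List Int) :=
  match pending with
  | [] => none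
  | c :: rest =>
    if pvSafe sol c then
      if h1 : ((sol ++ [c]).length : Int) = dimensions then some (sol ++ [c])
      else if h2 : ((sol ++ [c]).length : Int) < dimensions then
        match pvTry dimensions (sol ++ [c]) (PySem.List.pyRange 0 dimensions 1) with
        | some r => some r
        | none => pvTry dimensions sol rest
      else pvTry dimensions sol rest
    else pvTry dimensions sol rest
termination_by (dimensions - sol.length).toNat * ((PySem.List.pyRange 0 dimensions 1).length + 1) + pending.length
decreasing_by
  · have hl : (dimensions - ((sol ++ [c]).length : Int)).toNat + 1 = (dimensions - (sol.length : Int)).toNat := by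
      simp at h2 ⊢; omega
    rw [← hl, Nat.succ_mul]
    simp only [List.length_cons]
    omega
  all_goals { simp only [List.length_cons]; omega }

def ucs_solver_alt (partial_solution : List Int) (dimensions : Int) : Option (List Int) :=
  if (partial_solution.length : Int) = dimensions then some partial_solution
  else if (partial_solution.length : Int) > dimensions then none
  else pvTry dimensions partial_solution (PySem.List.pyRange 0 dimensions 1)

-- ===== PRECONDITION & SPEC =====
def Spec_ucs_solver (partial_solution : List Int) (dimensions : Int) (out : Option (List Int)) : Prop := out = ucs_solver_alt partial_solution dimensions
instance (partial_solution : List Int) (dimensions : Int) (out : Option (List Int)) : Decidable (Spec_ucs_solver partial_solution dimensions out) := by unfold Spec_ucs_solver; infer_instance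

-- ===== CLAIM (what is proved, stated in full; the proofs are below) =====
def Claim_equal_ucs_solver : Prop := ∀ (partial_solution : List Int) (dimensions : Int), Dom_ucs_solver partial_solution dimensions → Spec_ucs_solver partial_solution dimensions (ucs_solver partial_solution dimensions)

-- ===== LEMMAS AND PROOFS =====

-- listLt is a strict total order (Python's `<` on int lists)
lemma listLt_trans : ∀ a b c : List Int, listLt a b = true → listLt b c = true → listLt a c = true := by
  intro a
  induction a with
  | nil =>
    intro b c hab hbc
    cases b with
    | nil => simp [listLt] at hab
    | cons b1 bs =>
      cases c with
      | nil => simp [listLt] at hbc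
      | cons c1 cs => simp [listLt]
  | cons a1 as ih =>
    intro b c hab hbc
    cases b with
    | nil => simp [listLt] at hab
    | cons b1 bs =>
      cases c with
      | nil => simp [listLt] at hbc
      | cons c1 cs =>
        simp only [listLt, Bool.or_eq_true, Bool.and_eq_true, decide_eq_true_eq, beq_iff_eq] at *
        rcases hab with h1 | ⟨h1, h2⟩ <;> rcases hbc with h3 | ⟨h3, h4⟩
        · exact Or.inl (by omega)
        · exact Or.inl (by omega)
        · exact Or.inl (by omega)
        · exact Or.inr ⟨by omega, ih bs cs h2 h4⟩

lemma listLt_irrefl : ∀ a : List Int, listLt a a = false := by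
  intro a
  induction a with
  | nil => rfl
  | cons a1 as ih => simp [listLt, ih]

lemma listLt_asymm {a b : List Int} (h : listLt a b = true) : listLt b a = false := by
  by_contra hc
  have hba : listLt b a = true := by
    cases hx : listLt b a
    · exact absurd hx hc
    · rfl
  have := listLt_trans a b a h hba
  rw [listLt_irrefl] at this
  exact Bool.noConfusion this

lemma listLt_false_cases : ∀ a b : List Int, listLt a b = false → a = b ∨ listLt b a = true := by
  intro a
  induction a with
  | nil =>
    intro b hab
    cases b with
    | nil => exact Or.inl rfl
    | cons b1 bs => simp [listLt] at hab
  | cons a1 as ih =>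
    intro b hab
    cases b with
    | nil => exact Or.inr (by simp [listLt])
    | cons b1 bs =>
      simp only [listLt, Bool.or_eq_false_iff, Bool.and_eq_false_iff] at hab
      obtain ⟨h1, h2⟩ := hab
      have ha1 : ¬ a1 < b1 := by simpa using h1
      by_cases he : a1 = b1
      · subst he
        rcases h2 with h2 | h2
        · simp at h2
        · rcases ih bs h2 with h3 | h3
          · exact Or.inl (by rw [h3])
          · exact Or.inr (by simp [listLt, h3])
      · have : b1 < a1 := by omega
        exact Or.inr (by simp [listLt, this])

-- pairLt (Python's `<` on the heap tuples)
lemma pairLt_trans {x y z : Int × List Int} (h1 : pairLt x y = true) (h2 : pairLt y z = true) :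
    pairLt x z = true := by
  simp only [pairLt, Bool.or_eq_true, Bool.and_eq_true, decide_eq_true_eq, beq_iff_eq] at *
  rcases h1 with h1 | ⟨h1, h1'⟩ <;> rcases h2 with h2 | ⟨h2, h2'⟩
  · exact Or.inl (by omega)
  · exact Or.inl (by omega)
  · exact Or.inl (by omega)
  · exact Or.inr ⟨by omega, listLt_trans _ _ _ h1' h2'⟩

lemma pairLt_irrefl (x : Int × List Int) : pairLt x x = false := by
  simp [pairLt, listLt_irrefl]

lemma pairLt_false_cases {x y : Int × List Int} (h : pairLt x y = false) :
    x = y ∨ pairLt y x = true := by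
  simp only [pairLt, Bool.or_eq_false_iff, Bool.and_eq_false_iff] at h
  obtain ⟨h1, h2⟩ := h
  have hle : ¬ x.1 < y.1 := by simpa using h1
  by_cases he : x.1 = y.1
  · rcases h2 with h2 | h2
    · simp [he] at h2
    · rcases listLt_false_cases _ _ h2 with h3 | h3
      · exact Or.inl (Prod.ext he h3)
      · exact Or.inr (by simp [pairLt, he, h3])
  · have : y.1 < x.1 := by omega
    exact Or.inr (by simp [pairLt, this])

-- popMin really is the minimum of the queue
lemma foldl_min_le (xs : List (Int × List Int)) : ∀ acc, ∀ y ∈ acc :: xs,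
    pairLt y (xs.foldl (fun m y => if pairLt y m then y else m) acc) = false := by
  induction xs with
  | nil =>
    intro acc y hy
    simp at hy
    subst hy
    exact pairLt_irrefl _
  | cons z zs ih =>
    intro acc y hy
    simp only [List.foldl_cons]
    have hacc' : ∀ w ∈ (if pairLt z acc then z else acc) :: zs,
        pairLt w (zs.foldl (fun m y => if pairLt y m then y else m) (if pairLt z acc then z else acc)) = false :=
      ih _
    set r := zs.foldl (fun m y => if pairLt y m then y else m) (if pairLt z acc then z else acc) with hr
    have hner : pairLt (if pairLt z acc then z else acc) r = false := hacc' _ (by simp)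
    rcases List.mem_cons.mp hy with h | h
    · subst h
      by_cases hza : pairLt z y = true
      · rw [if_pos hza] at hacc' hner
        cases hyr : pairLt y r
        · rfl
        · exfalso
          have := pairLt_trans hza hyr
          rw [hner] at this
          exact Bool.noConfusion this
      · have hza' : pairLt z y = false := by
          cases hx : pairLt z y
          · rfl
          · exact absurd hx hza
        rw [if_neg (by simp [hza'])] at hacc' hner
        exact hner
    · rcases List.mem_cons.mp h with h | h
      · subst h
        by_cases hza : pairLt y acc = true
        · rw [if_pos hza] at hacc' hner
          exact hner
        · have hza' : pairLt y acc = false := by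
            cases hx : pairLt y acc
            · rfl
            · exact absurd hx hza
          rw [if_neg (by simp [hza'])] at hacc' hner
          cases hyr : pairLt y r
          · rfl
          · exfalso
            rcases pairLt_false_cases hza' with he | hlt
            · subst he
              rw [hner] at hyr
              exact Bool.noConfusion hyr
            · have := pairLt_trans hlt hyr
              rw [hner] at this
              exact Bool.noConfusion this
      · exact hacc' y (by simp [h])

lemma popMin_min (x : Int × List Int) (xs : List (Int × List Int)) :
    ∀ y ∈ x :: xs, pairLt y (popMin x xs) = false := by
  intro y hy
  exact foldl_min_le xs x y hy

-- olt / omin: ordering of DFS results (none = "no solution", the largest)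
def olt : Option (List Int) → Option (List Int) → Bool
  | none, _ => false
  | some _, none => true
  | some a, some b => listLt a b

def omin (a b : Option (List Int)) : Option (List Int) := if olt b a then b else a

lemma olt_trans {a b c : Option (List Int)} (h1 : olt a b = true) (h2 : olt b c = true) :
    olt a c = true := by
  cases a <;> cases b <;> cases c <;> simp [olt] at * <;> try exact listLt_trans _ _ _ h1 h2

lemma olt_irrefl (a : Option (List Int)) : olt a a = false := by
  cases a <;> simp [olt, listLt_irrefl]

lemma olt_false_cases {a b : Option (List Int)} (h : olt a b = false) :
    a = b ∨ olt b a = true := by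
  cases a <;> cases b <;> simp [olt] at *
  · rcases listLt_false_cases _ _ h with h1 | h1
    · exact Or.inl h1
    · exact Or.inr h1

lemma omin_none_right (a : Option (List Int)) : omin a none = a := by
  cases a <;> rfl

lemma omin_none_left (b : Option (List Int)) : omin none b = b := by
  cases b <;> rfl

lemma omin_comm (a b : Option (List Int)) : omin a b = omin b a := by
  unfold omin
  by_cases h1 : olt b a = true
  · rw [if_pos h1]
    have h2 : olt a b = false := by
      cases hx : olt a b
      · rfl
      · have := olt_trans hx h1
        rw [olt_irrefl] at this
        exact Bool.noConfusion this
    rw [if_neg (by simp [h2])]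
  · have h1' : olt b a = false := by
      cases hx : olt b a
      · rfl
      · exact absurd hx h1
    rw [if_neg h1]
    rcases olt_false_cases h1' with he | hlt
    · rw [he, if_neg (by simp [olt_irrefl])]
    · rw [if_pos hlt]

lemma omin_assoc (a b c : Option (List Int)) : omin (omin a b) c = omin a (omin b c) := by
  unfold omin
  by_cases hba : olt b a = true
  · rw [if_pos hba]
    by_cases hcb : olt c b = true
    · rw [if_pos hcb, if_pos (olt_trans hcb hba)]
    · rw [if_neg hcb, if_pos hba]
  · rw [if_neg hba]
    by_cases hcb : olt c b = true
    · rw [if_pos hcb]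
    · rw [if_neg hcb, if_neg hba]
      by_cases hca : olt c a = true
      · exfalso
        have hcb' : olt c b = false := by
          cases hx : olt c b
          · rfl
          · exact absurd hx hcb
        have hba' : olt b a = false := by
          cases hx : olt b a
          · rfl
          · exact absurd hx hba
        rcases olt_false_cases hcb' with he | hbc
        · subst he
          rw [hba'] at hca
          exact Bool.noConfusion hca
        · rcases olt_false_cases hba' with he | hab
          · subst he
            rw [hcb'] at hca
            exact Bool.noConfusion hca
          · have := olt_trans hca (olt_trans hab hbc)
            rw [olt_irrefl] at this
            exact Bool.noConfusion this
      · rw [if_neg hca]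

lemma omin_left_comm (a b c : Option (List Int)) : omin a (omin b c) = omin b (omin a c) := by
  rw [← omin_assoc, omin_comm a b, omin_assoc]

-- the minimum DFS result over a queue of partial solutions
def minC (dimensions : Int) (q : List (Int × List Int)) : Option (List Int) :=
  q.foldr (fun p acc => omin (ucs_solver_alt p.2 dimensions) acc) none

lemma minC_nil (dimensions : Int) : minC dimensions [] = none := rfl

lemma minC_cons (dimensions : Int) (p : Int × List Int) (q : List (Int × List Int)) :
    minC dimensions (p :: q) = omin (ucs_solver_alt p.2 dimensions) (minC dimensions q) := rfl

lemma minC_perm {dimensions : Int} {q q' : List (Int × List Int)} (h : q.Perm q') :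
    minC dimensions q = minC dimensions q' := by
  unfold minC
  have lcomm : LeftCommutative (fun (p : Int × List Int) (acc : Option (List Int)) =>
      omin (ucs_solver_alt p.2 dimensions) acc) := ⟨fun a b c => omin_left_comm _ _ _⟩
  exact @List.Perm.foldr_eq _ _ _ _ _ lcomm h none

lemma foldr_omin_seed (dimensions : Int) (q : List (Int × List Int)) (b : Option (List Int)) :
    q.foldr (fun p acc => omin (ucs_solver_alt p.2 dimensions) acc) b = omin (minC dimensions q) b := by
  induction q with
  | nil => simp [minC_nil, omin_none_left]
  | cons p q ih =>
    simp only [List.foldr_cons, minC_cons, ih, omin_assoc]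

lemma minC_append (dimensions : Int) (q q' : List (Int × List Int)) :
    minC dimensions (q ++ q') = omin (minC dimensions q) (minC dimensions q') := by
  unfold minC
  rw [List.foldr_append]
  exact foldr_omin_seed dimensions q _

lemma minC_absorb {dimensions : Int} {a : Option (List Int)} {q : List (Int × List Int)}
    (h : ∀ p ∈ q, omin a (ucs_solver_alt p.2 dimensions) = a) :
    omin a (minC dimensions q) = a := by
  induction q with
  | nil => rw [minC_nil, omin_none_right]
  | cons p q ih =>
    rw [minC_cons, ← omin_assoc, h p (by simp)]
    exact ih (fun p hp => h p (by simp [hp]))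

-- ucs_solver_alt at the three top-level cases
lemma alt_len_eq {s : List Int} {d : Int} (h : (s.length : Int) = d) :
    ucs_solver_alt s d = some s := by
  simp [ucs_solver_alt, h]

lemma alt_len_gt {s : List Int} {d : Int} (h : (s.length : Int) > d) :
    ucs_solver_alt s d = none := by
  have h1 : ¬ ((s.length : Int) = d) := by omega
  simp [ucs_solver_alt, h1, h]

lemma alt_len_lt {s : List Int} {d : Int} (h : (s.length : Int) < d) :
    ucs_solver_alt s d = pvTry d s (PySem.List.pyRange 0 d 1) := by
  have h1 : ¬ ((s.length : Int) = d) := by omega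
  have h2 : ¬ ((s.length : Int) > d) := by omega
  simp [ucs_solver_alt, h1, h2]

-- every DFS result extends the partial solution it was started from
lemma try_prefix : ∀ (d : Int) (sol pending : List Int) (r : List Int),
    pvTry d sol pending = some r → sol <+: r := by
  intro d sol pending
  induction sol, pending using pvTry.induct d with
  | case1 sol => intro r h; simp [pvTry] at h
  | case2 sol c rest hs h1 =>
    intro r h
    rw [pvTry, if_pos hs, dif_pos h1] at h
    obtain rfl : sol ++ [c] = r := Option.some.inj h
    exact List.prefix_append _ _
  | case3 sol c rest hs h1 h2 r' hmatch ih1 =>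
    intro r h
    rw [pvTry, if_pos hs, dif_neg h1, dif_pos h2, hmatch] at h
    obtain rfl : r' = r := Option.some.inj h
    exact (List.prefix_append sol [c]).trans (ih1 r' hmatch)
  | case4 sol c rest hs h1 h2 hmatch ih1 ih2 =>
    intro r h
    rw [pvTry, if_pos hs, dif_neg h1, dif_pos h2, hmatch] at h
    exact ih2 r h
  | case5 sol c rest hs h1 h2 ih =>
    intro r h
    rw [pvTry, if_pos hs, dif_neg h1, dif_neg h2] at h
    exact ih r h
  | case6 sol c rest hs ih =>
    intro r h
    rw [pvTry, if_neg hs] at h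
    exact ih r h

lemma alt_prefix {t : List Int} {d : Int} {r : List Int}
    (h : ucs_solver_alt t d = some r) : t <+: r := by
  unfold ucs_solver_alt at h
  split_ifs at h with h1 h2
  all_goals first
    | exact Option.noConfusion h
    | exact (Option.some.inj h) ▸ List.prefix_refl t
    | exact try_prefix d t _ r h

-- A's per-push check equals B's pvSafe
lemma valid_append (s : List Int) (col : Int) : pvValid (s ++ [col]) = pvSafe s col := by
  unfold pvValid pvSafe
  have hl : ((s ++ [col]).length : Int) - 1 = (s.length : Int) := by simp
  rw [hl]
  rw [show (s ++ [col]) = s ++ col :: [] from rfl]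
  rw [PySem.List.pyGet?_append_length s [] col]
  have hsl : PySem.List.slice (s ++ col :: []) none (some (s.length : Int)) = s := by
    rw [PySem.List.slice_to_natCast]
    exact List.take_left
  rw [hsl]

lemma safe_not_mem {s : List Int} {col : Int} (h : pvSafe s col = true) :
    s.contains col = false := by
  by_contra hc
  have hmem : col ∈ s := by
    cases hx : s.contains col
    · exact absurd hx hc
    · simpa using hx
  obtain ⟨k, hk, hks⟩ := List.getElem_of_mem hmem
  unfold pvSafe at h
  rw [List.all_eq_true] at h
  have hp : ((0 : Int) + k, col) ∈ PySem.List.enumerate s 0 := by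
    rw [PySem.List.mem_enumerate_iff]
    exact ⟨k, hk, by rw [hks]⟩
  have := h _ hp
  simp at this

lemma cond_eq_safe (s : List Int) (col : Int) :
    (!(s.contains col) && pvValid (s ++ [col])) = pvSafe s col := by
  rw [valid_append]
  cases hs : pvSafe s col
  · simp
  · rw [safe_not_mem hs]
    rfl

-- lexicographic comparison of two completions that branch at the same position
lemma listLt_append_cons (s u v : List Int) (c c' : Int) (h : c < c') :
    listLt (s ++ c :: u) (s ++ c' :: v) = true := by
  induction s with
  | nil => simp [listLt, h]
  | cons a s ih => simp [listLt, ih]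

lemma omin_some_extend {s : List Int} {c c' : Int} (h : c < c') {r : List Int}
    (hr : (s ++ [c]) <+: r) (y : Option (List Int))
    (hy : ∀ r', y = some r' → (s ++ [c']) <+: r') :
    omin (some r) y = some r := by
  cases y with
  | none => exact omin_none_right _
  | some r' =>
    obtain ⟨u, hu⟩ := hr
    obtain ⟨v, hv⟩ := hy r' rfl
    have hru : r = s ++ c :: u := by rw [← hu]; simp
    have hrv : r' = s ++ c' :: v := by rw [← hv]; simp
    have hlt : listLt r r' = true := by rw [hru, hrv]; exact listLt_append_cons s u v c c' h
    have holt : olt (some r') (some r) = false := listLt_asymm hlt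
    unfold omin
    rw [holt]
    rfl

-- DFS over a strictly increasing pending list computes the minimum over A's pushed children
lemma try_eq_min (d k : Int) (s : List Int) (hlen : (s.length : Int) < d) :
    ∀ pending : List Int, pending.Pairwise (· < ·) →
      pvTry d s pending
        = minC d (pending.filterMap (fun col =>
            if !s.contains col && pvValid (s ++ [col]) then some (k, s ++ [col]) else none)) := by
  intro pending
  induction pending with
  | nil => intro _; rw [pvTry]; rfl
  | cons c rest ih =>
    intro hp
    obtain ⟨hcr, hrest⟩ := List.pairwise_cons.mp hp
    have habs : ∀ (r : List Int), (s ++ [c]) <+: r →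
        ∀ p ∈ rest.filterMap (fun col =>
            if !s.contains col && pvValid (s ++ [col]) then some (k, s ++ [col]) else none),
          omin (some r) (ucs_solver_alt p.2 d) = some r := by
      intro r hpre p hp'
      obtain ⟨c', hc', hif⟩ := List.mem_filterMap.mp hp'
      have hcond : (!s.contains c' && pvValid (s ++ [c'])) = true := by
        by_contra hcnd
        rw [if_neg hcnd] at hif
        cases hif
      rw [if_pos hcond] at hif
      obtain rfl : (k, s ++ [c']) = p := Option.some.inj hif
      exact omin_some_extend (hcr c' hc') hpre _ (fun r' hr' => alt_prefix hr')
    rw [List.filterMap_cons]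
    rw [cond_eq_safe]
    by_cases hs : pvSafe s c = true
    · rw [if_pos hs]
      rw [minC_cons]
      simp only
      by_cases h1 : ((s ++ [c]).length : Int) = d
      · rw [pvTry, if_pos hs, dif_pos h1]
        rw [alt_len_eq h1]
        exact (minC_absorb (habs (s ++ [c]) (List.prefix_refl _))).symm
      · have h2 : ((s ++ [c]).length : Int) < d := by
          simp only [List.length_append, List.length_cons, List.length_nil] at *
          push_cast at *
          omega
        rw [pvTry, if_pos hs, dif_neg h1, dif_pos h2]
        rw [← alt_len_lt h2]
        cases halt : ucs_solver_alt (s ++ [c]) d with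
        | some r =>
          exact (minC_absorb (habs r (alt_prefix halt))).symm
        | none =>
          rw [omin_none_left]
          exact ih hrest
    · rw [if_neg hs]
      rw [pvTry, if_neg hs]
      exact ih hrest

-- each W^free term is positive, so a nonempty queue has positive measure
lemma measure_pos (dimensions : Int) (x : Int × List Int) (xs : List (Int × List Int)) :
    1 ≤ pvMeasure dimensions (x :: xs) := by
  unfold pvMeasure
  simp only [List.map_cons, List.sum_cons]
  have : 0 < pvW dimensions ^ pvFree dimensions x.2 := Nat.pow_pos (by unfold pvW; omega)
  omega

-- MAIN INVARIANT: the UCS loop returns the minimum DFS completion over its queue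
lemma loop_eq_min (d : Int) : ∀ (n : Nat) (k : Int) (q : List (Int × List Int)),
    pvMeasure d q ≤ n →
    (∀ p ∈ q, p.1 = (p.2.length : Int) - k ∧ (p.2.length : Int) ≤ d) →
    loopA d q = minC d q := by
  intro n
  induction n with
  | zero =>
    intro k q hm hinv
    cases q with
    | nil => rw [loopA]; rfl
    | cons x xs =>
      have := measure_pos d x xs
      omega
  | succ n ih =>
    intro k q hm hinv
    cases q with
    | nil => rw [loopA]; rfl
    | cons x xs =>
      have hmem := popMin_mem x xs
      have hperm := List.perm_cons_erase hmem
      have hinvm := hinv _ hmem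
      rw [loopA]
      by_cases hgoal : (((popMin x xs).2.length : Int)) = d
      · rw [if_pos hgoal]
        rw [minC_perm hperm, minC_cons, alt_len_eq hgoal]
        refine (minC_absorb ?_).symm
        intro p hp
        have hpq : p ∈ x :: xs := List.mem_of_mem_erase hp
        have hplt := popMin_min x xs p hpq
        have hpinv := hinv p hpq
        simp only [pairLt, Bool.or_eq_false_iff, Bool.and_eq_false_iff] at hplt
        obtain ⟨hc1, hc2⟩ := hplt
        have hc1' : ¬ p.1 < (popMin x xs).1 := by simpa using hc1
        have hceq : p.1 = (popMin x xs).1 := by omega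
        have hlen : (p.2.length : Int) = d := by omega
        rw [alt_len_eq hlen]
        have hll : olt (some p.2) (some (popMin x xs).2) = false := by
          rcases hc2 with h | h
          · simp [hceq] at h
          · exact h
        unfold omin
        rw [hll]
        rfl
      · rw [if_neg hgoal]
        have hltd : (((popMin x xs).2.length : Int)) < d := lt_of_le_of_ne hinvm.2 hgoal
        have hinv' : ∀ p ∈ ((x :: xs).erase (popMin x xs)) ++ childrenA d (popMin x xs),
            p.1 = (p.2.length : Int) - k ∧ (p.2.length : Int) ≤ d := by
          intro p hp
          rcases List.mem_append.mp hp with h | h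
          · exact hinv p (List.mem_of_mem_erase h)
          · obtain ⟨col, _, hif⟩ := List.mem_filterMap.mp h
            have hcond : (!(popMin x xs).2.contains col && pvValid ((popMin x xs).2 ++ [col])) = true := by
              by_contra hcnd
              rw [if_neg hcnd] at hif
              cases hif
            rw [if_pos hcond] at hif
            obtain rfl : ((popMin x xs).1 + 1, (popMin x xs).2 ++ [col]) = p := Option.some.inj hif
            constructor
            · simp only [List.length_append, List.length_cons, List.length_nil]
              push_cast
              omega
            · simp only [List.length_append, List.length_cons, List.length_nil]
              push_cast
              omega
        have hmeas : pvMeasure d (((x :: xs).erase (popMin x xs)) ++ childrenA d (popMin x xs)) ≤ n := by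
          have := measure_step d x xs
          omega
        rw [ih k _ hmeas hinv']
        rw [minC_append]
        have hch : minC d (childrenA d (popMin x xs)) = ucs_solver_alt (popMin x xs).2 d := by
          rw [alt_len_lt hltd]
          rw [try_eq_min d ((popMin x xs).1 + 1) (popMin x xs).2 hltd _
            (PySem.List.pairwise_lt_pyRange_one 0 d)]
          rfl
        rw [hch, omin_comm]
        rw [minC_perm hperm, minC_cons]

-- if every queue entry is already longer than the board, the loop never reaches a goal
lemma loop_none (d : Int) : ∀ (n : Nat) (q : List (Int × List Int)),
    pvMeasure d q ≤ n →
    (∀ p ∈ q, (p.2.length : Int) > d) →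
    loopA d q = none := by
  intro n
  induction n with
  | zero =>
    intro q hm hinv
    cases q with
    | nil => rw [loopA]
    | cons x xs =>
      have := measure_pos d x xs
      omega
  | succ n ih =>
    intro q hm hinv
    cases q with
    | nil => rw [loopA]
    | cons x xs =>
      have hmem := popMin_mem x xs
      have hinvm := hinv _ hmem
      rw [loopA]
      rw [if_neg (by omega)]
      have hinv' : ∀ p ∈ ((x :: xs).erase (popMin x xs)) ++ childrenA d (popMin x xs),
          (p.2.length : Int) > d := by
        intro p hp
        rcases List.mem_append.mp hp with h | h
        · exact hinv p (List.mem_of_mem_erase h)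
        · obtain ⟨col, _, hif⟩ := List.mem_filterMap.mp h
          have hcond : (!(popMin x xs).2.contains col && pvValid ((popMin x xs).2 ++ [col])) = true := by
            by_contra hcnd
            rw [if_neg hcnd] at hif
            cases hif
          rw [if_pos hcond] at hif
          obtain rfl : ((popMin x xs).1 + 1, (popMin x xs).2 ++ [col]) = p := Option.some.inj hif
          simp only [List.length_append, List.length_cons, List.length_nil]
          push_cast
          omega
      have hmeas : pvMeasure d (((x :: xs).erase (popMin x xs)) ++ childrenA d (popMin x xs)) ≤ n := by
        have := measure_step d x xs
        omega
      exact ih _ hmeas hinv'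

-- ===== VERDICT (by name: the statement is the Claim_ definition above) =====
theorem ucs_solver_spec : Claim_equal_ucs_solver := by
  intro partial_solution dimensions _
  unfold Spec_ucs_solver ucs_solver
  by_cases h : (partial_solution.length : Int) ≤ dimensions
  · rw [loop_eq_min dimensions (pvMeasure dimensions [(0, partial_solution)])
      (partial_solution.length : Int) _ (le_refl _)
      (by intro p hp; simp at hp; rw [hp]; constructor <;> simp [h])]
    rw [minC_cons, minC_nil, omin_none_right]
  · rw [loop_none dimensions (pvMeasure dimensions [(0, partial_solution)]) _ (le_refl _)
      (by intro p hp; simp at hp; rw [hp]; simp; omega)]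
    rw [alt_len_gt (by omega)]
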